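-- pv_equiv track=rewrite | github.com/chaddugas/thread_control_panel | platform/bridge/panel_bridge/controls/wifi_manage.py | _parse_t_line
-- ===== SOURCE A (Python) =====
-- def _parse_t_line(line: str) -> list[str]:
--     """Split nmcli -t output by ':', honoring backslash escapes."""
--     fields: list[str] = []
--     cur: list[str] = []
--     i = 0
--     while i < len(line):
--         c = line[i]
--         if c == "\\" and i + 1 < len(line):
--             cur.append(line[i + 1])
--             i += 2
--         elif c == ":":
--             fields.append("".join(cur))
--             cur = []
--             i += 1
--         else:
--             cur.append(c)
--             i += 1
--     fields.append("".join(cur))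
--     return fields
-- ===== SOURCE B (Python) =====
-- def _unescape(field: str) -> str:
--     """Resolve backslash escapes pairwise; a lone trailing backslash stays literal."""
--     out = []
--     it = iter(field)
--     for c in it:
--         out.append(next(it, "\\") if c == "\\" else c)
--     return "".join(out)
--
--
-- def _parse_t_line(line: str) -> list[str]:
--     """Split nmcli -t output by ':', honoring backslash escapes.
--
--     Staged algorithm: split on every ':' first, then re-merge chunks whose
--     separating colon was escaped (the pending chunk ends in an odd number of
--     backslashes), then unescape each merged field."""
--     chunks = line.split(":")
--     pending = chunks[0]
--     merged: list[str] = []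
--     for chunk in chunks[1:]:
--         if (len(pending) - len(pending.rstrip("\\"))) % 2:
--             pending = pending + ":" + chunk
--         else:
--             merged.append(pending)
--             pending = chunk
--     merged.append(pending)
--     return [_unescape(f) for f in merged]
-- ===== Notes on version B (the rewrite author's own statement) =====
-- stated objective: faster
-- what changed: Replaces the per-character index-with-lookahead scan by a staged algorithm: str.split on the colon separator first, then merging chunks whose separating colon was escaped (odd count of trailing backslashes, via rstrip), then a separate unescape pass per field; the bulk scanning moves into C-level str.split/rstrip/join.
import Mathlib
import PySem

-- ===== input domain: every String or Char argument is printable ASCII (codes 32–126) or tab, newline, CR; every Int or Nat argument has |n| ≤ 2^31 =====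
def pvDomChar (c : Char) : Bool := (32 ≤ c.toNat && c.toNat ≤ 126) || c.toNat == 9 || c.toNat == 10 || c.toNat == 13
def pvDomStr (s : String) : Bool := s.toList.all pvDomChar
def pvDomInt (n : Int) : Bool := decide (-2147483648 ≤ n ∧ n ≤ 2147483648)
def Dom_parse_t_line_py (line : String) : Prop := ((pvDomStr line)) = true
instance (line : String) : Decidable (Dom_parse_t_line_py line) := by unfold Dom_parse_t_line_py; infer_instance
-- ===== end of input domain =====

-- B replaces A's per-character index-with-lookahead scan by a staged algorithm (split on the colon
-- separator, re-merge chunks whose separating colon was escaped, unescape each field); measured faster.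

-- ===== PORT A =====
-- A's while loop over index i, as recursion over the remaining characters;
-- the branch `c == '\\' and i + 1 < len(line)` consumes two characters at once.
def parseALoop : List Char → List Char → List String → List String
  | [], cur, fields => fields ++ [String.ofList cur]
  | c :: rest, cur, fields =>
    if h : c = '\\' ∧ rest ≠ [] then
      parseALoop rest.tail (cur ++ [rest.head h.2]) fields
    else if c = ':' then
      parseALoop rest [] (fields ++ [String.ofList cur])
    else
      parseALoop rest (cur ++ [c]) fields
termination_by cs _ _ => cs.length
decreasing_by all_goals simp [List.length_tail]

def parse_t_line_py (line : String) : List String :=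
  parseALoop line.toList [] []

-- ===== PORT B =====
-- Source B stage 1: line.split(":"), returned as (chunks[0], chunks[1:]).
def splitColon : List Char → List Char × List (List Char)
  | [] => ([], [])
  | c :: r =>
    let (h, t) := splitColon r
    if c = ':' then ([], h :: t) else (c :: h, t)

-- Source B: len(pending) - len(pending.rstrip("\\"))  (count of trailing backslashes)
def trailingBS (p : List Char) : Nat :=
  p.length - ((p.reverse.dropWhile (· = '\\')).reverse).length

-- Source B stage 2: the for-loop over chunks[1:] merging escaped separators; acc = merged.
def mergeLoop (pending : List Char) (acc : List (List Char)) : List (List Char) → List (List Char)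
  | [] => acc ++ [pending]
  | c :: cs =>
    if trailingBS pending % 2 = 1 then
      mergeLoop (pending ++ ':' :: c) acc cs
    else
      mergeLoop c (acc ++ [pending]) cs

-- Source B stage 3: _unescape — resolve escapes pairwise, lone trailing backslash stays.
def unesc : List Char → List Char
  | [] => []
  | c :: r =>
    if c = '\\' then
      match r with
      | [] => ['\\']
      | d :: r' => d :: unesc r'
    else c :: unesc r
termination_by cs => cs.length

def parse_t_line_py_alt (line : String) : List String :=
  let (h, t) := splitColon line.toList
  (mergeLoop h [] t).map (fun f => String.ofList (unesc f))

-- ===== PRECONDITION & SPEC =====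
def Spec_parse_t_line_py (line : String) (out : List String) : Prop := out = parse_t_line_py_alt line
instance (line : String) (out : List String) : Decidable (Spec_parse_t_line_py line out) := by unfold Spec_parse_t_line_py; infer_instance

-- ===== CLAIM (what is proved, stated in full; the proofs are below) =====
def Claim_equal_parse_t_line_py : Prop := ∀ (line : String), Dom_parse_t_line_py line → Spec_parse_t_line_py line (parse_t_line_py line)

-- ===== LEMMAS AND PROOFS =====

-- canonical form of the result, as raw char lists, following A's case analysis
def consHead (c : Char) : List (List Char) → List (List Char)
  | [] => [[c]]
  | x :: xs => (c :: x) :: xs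

def fSpec : List Char → List (List Char)
  | [] => [[]]
  | c :: rest =>
    if c = ':' then [] :: fSpec rest
    else if c = '\\' then
      match rest with
      | [] => [['\\']]
      | d :: r => consHead d (fSpec r)
    else consHead c (fSpec rest)
termination_by cs => cs.length

def mapHead (g : List Char → List Char) : List (List Char) → List (List Char)
  | [] => []
  | x :: xs => g x :: xs

theorem fSpec_ne_nil (cs : List Char) : fSpec cs ≠ [] := by
  induction cs using fSpec.induct with
  | case1 => simp [fSpec]
  | case2 r ih => rw [fSpec.eq_def]; simp
  | case3 h => rw [fSpec.eq_def]; simp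
  | case4 d r h ih =>
    rw [fSpec.eq_def]
    simp only [reduceIte, reduceCtorEq, if_neg h]
    cases hF : fSpec r <;> simp [consHead]
  | case5 d r h1 h2 ih =>
    rw [fSpec.eq_def]
    simp only [if_neg h1, if_neg h2]
    cases hF : fSpec r <;> simp [consHead]

theorem fSpec_colon (r : List Char) : fSpec (':' :: r) = [] :: fSpec r := by
  rw [fSpec.eq_def]; simp

theorem fSpec_bs2 (d : Char) (r : List Char) : fSpec ('\\' :: d :: r) = consHead d (fSpec r) := by
  rw [fSpec.eq_def]; simp

theorem fSpec_bs1 : fSpec ['\\'] = [['\\']] := by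
  rw [fSpec.eq_def]; simp

theorem fSpec_other (c : Char) (r : List Char) (hc : ¬ c = ':') (hb : ¬ c = '\\') :
    fSpec (c :: r) = consHead c (fSpec r) := by
  rw [fSpec.eq_def]; simp [hc, hb]

theorem mergeLoop_ne_nil (p : List Char) (acc : List (List Char)) (t : List (List Char)) :
    mergeLoop p acc t ≠ [] := by
  induction t generalizing p acc with
  | nil => simp [mergeLoop]
  | cons c cs ih => simp only [mergeLoop]; split <;> apply ih

theorem mergeLoop_acc (p : List Char) (acc : List (List Char)) (t : List (List Char)) :
    mergeLoop p acc t = acc ++ mergeLoop p [] t := by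
  induction t generalizing p acc with
  | nil => simp [mergeLoop]
  | cons c cs ih =>
    simp only [mergeLoop]
    split
    · exact ih _ _
    · rw [ih c (acc ++ [p]), ih c ([] ++ [p])]
      simp

theorem tw_dw_len (p : Char → Bool) (l : List Char) :
    (l.takeWhile p).length + (l.dropWhile p).length = l.length := by
  induction l with
  | nil => simp
  | cons a l ih =>
    by_cases h : p a = true <;>
      simp [List.takeWhile_cons, List.dropWhile_cons, h] <;> omega

theorem tw_append (p : Char → Bool) (l m : List Char) :
    (l ++ m).takeWhile p =
      if l.all p then l ++ m.takeWhile p else l.takeWhile p := by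
  induction l with
  | nil => simp
  | cons a l ih =>
    by_cases h : p a = true
    · simp only [List.cons_append, List.takeWhile_cons, h, List.all_cons, if_true,
        Bool.true_and, ih]
      split <;> simp
    · simp [List.takeWhile_cons, h, List.all_cons]

theorem trailingBS_eq (q : List Char) :
    trailingBS q = (q.reverse.takeWhile (· = '\\')).length := by
  have h := tw_dw_len (· = '\\') q.reverse
  rw [List.length_reverse] at h
  simp only [trailingBS, List.length_reverse]
  omega

theorem tw_self (p : Char → Bool) (l : List Char) (h : l.all p = true) :
    l.takeWhile p = l := by
  induction l with
  | nil => rfl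
  | cons a l ih =>
    simp only [List.all_cons, Bool.and_eq_true] at h
    simp [List.takeWhile_cons, h.1, ih h.2]

theorem all_rev (p : Char → Bool) (l : List Char) : l.reverse.all p = l.all p := by
  simp

theorem trailingBS_all (q : List Char) (h : q.all (· = '\\') = true) :
    trailingBS q = q.length := by
  rw [trailingBS_eq, tw_self _ _ (by rw [all_rev]; exact h), List.length_reverse]

theorem trailingBS_append (u v : List Char) :
    trailingBS (u ++ v) =
      if v.all (· = '\\') then v.length + trailingBS u else trailingBS v := by
  rw [trailingBS_eq, List.reverse_append, tw_append]
  by_cases h : v.all (· = '\\') = true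
  · rw [if_pos (by rw [all_rev]; exact h), if_pos h, List.length_append,
      List.length_reverse, trailingBS_eq]
  · rw [if_neg (by rw [all_rev]; exact h), if_neg h, trailingBS_eq]

theorem hpar_even (p q : List Char) (h0 : trailingBS p % 2 = 0) :
    trailingBS (p ++ q) % 2 = trailingBS q % 2 := by
  rw [trailingBS_append]
  split
  · rw [trailingBS_all q (by assumption)]; omega
  · rfl

-- key lemma: prepending to the pending chunk commutes with mergeLoop when the
-- trailing-backslash parity is unchanged
theorem mergeLoop_prepend (t : List (List Char)) (p q : List Char)
    (hpar : trailingBS (p ++ q) % 2 = trailingBS q % 2) :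
    mergeLoop (p ++ q) [] t = mapHead (p ++ ·) (mergeLoop q [] t) := by
  induction t generalizing q with
  | nil => simp [mergeLoop, mapHead]
  | cons c cs ih =>
    simp only [mergeLoop, hpar]
    by_cases hq : trailingBS q % 2 = 1
    · rw [if_pos hq, if_pos hq, List.append_assoc]
      apply ih
      have hne : ((q ++ ':' :: c).all (· = '\\')) = false := by
        simp [List.all_append]
      rw [trailingBS_append, hne, if_neg (by simp)]
    · rw [if_neg hq, if_neg hq, mergeLoop_acc, mergeLoop_acc c ([] ++ [q])]
      simp [mapHead]

theorem mergeLoop_prepend' (p h : List Char) (t : List (List Char))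
    (h0 : trailingBS p % 2 = 0) :
    mergeLoop (p ++ h) [] t = mapHead (p ++ ·) (mergeLoop h [] t) :=
  mergeLoop_prepend t p h (hpar_even p h h0)

theorem trailingBS_pair (a b : Char) (ha : ¬ b = '\\' ∨ a = '\\') :
    trailingBS [a, b] % 2 = 0 := by
  rcases ha with hb | ha
  · simp [trailingBS_eq, List.takeWhile_cons, hb]
  · subst ha
    by_cases hb : b = '\\' <;>
      simp [trailingBS_eq, List.takeWhile_cons, hb]

theorem trailingBS_single (c : Char) (hc : ¬ c = '\\') : trailingBS [c] % 2 = 0 := by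
  simp [trailingBS_eq, List.takeWhile_cons, hc]

theorem exists_cons_merge (h : List Char) (t : List (List Char)) :
    ∃ x xs, mergeLoop h [] t = x :: xs := by
  cases hM : mergeLoop h [] t with
  | nil => exact absurd hM (mergeLoop_ne_nil _ _ _)
  | cons x xs => exact ⟨x, xs, rfl⟩

theorem unesc_nil : unesc [] = [] := by
  rw [unesc.eq_def]

theorem unesc_bs (d : Char) (x : List Char) : unesc ('\\' :: d :: x) = d :: unesc x := by
  rw [unesc.eq_def]; simp

theorem unesc_other (c : Char) (hc : ¬ c = '\\') (x : List Char) :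
    unesc (c :: x) = c :: unesc x := by
  rw [unesc.eq_def]
  cases x <;> simp [hc]

theorem mergeStage_eq_fSpec (cs : List Char) :
    (mergeLoop (splitColon cs).1 [] (splitColon cs).2).map unesc = fSpec cs := by
  induction cs using fSpec.induct with
  | case1 => simp [splitColon, mergeLoop, unesc, fSpec]
  | case2 r ih =>
    rcases hs : splitColon r with ⟨h, t⟩
    rw [hs] at ih
    have hsp : splitColon (':' :: r) = ([], h :: t) := by simp [splitColon, hs]
    rw [hsp]
    have hm : mergeLoop [] [] (h :: t) = [] :: mergeLoop h [] t := by
      simp only [mergeLoop, if_neg (by decide : ¬ trailingBS [] % 2 = 1)]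
      rw [mergeLoop_acc]
      simp
    rw [hm]
    simp only [List.map_cons]
    rw [unesc_nil, ih, fSpec_colon]
  | case3 h =>
    simp [splitColon, mergeLoop, fSpec, unesc.eq_def]
  | case4 d r h ih =>
    rcases hs : splitColon r with ⟨h0, t⟩
    rw [hs] at ih
    by_cases hd : d = ':'
    · subst hd
      have hsp : splitColon ('\\' :: ':' :: r) = (['\\'], h0 :: t) := by
        simp [splitColon, hs]
      rw [hsp]
      have hm : mergeLoop ['\\'] [] (h0 :: t) =
          mapHead (['\\', ':'] ++ ·) (mergeLoop h0 [] t) := by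
        simp only [mergeLoop, if_pos (by decide : trailingBS ['\\'] % 2 = 1)]
        exact mergeLoop_prepend' ['\\', ':'] h0 t (by decide)
      rw [hm]
      obtain ⟨x, xs, hx⟩ := exists_cons_merge h0 t
      rw [hx] at ih ⊢
      rw [fSpec_bs2, ← ih]
      simp [mapHead, unesc_bs, consHead]
    · have hsp : splitColon ('\\' :: d :: r) = ('\\' :: d :: h0, t) := by
        simp [splitColon, hs, hd]
      rw [hsp]
      have hm : mergeLoop ('\\' :: d :: h0) [] t =
          mapHead (['\\', d] ++ ·) (mergeLoop h0 [] t) :=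
        mergeLoop_prepend' ['\\', d] h0 t (trailingBS_pair '\\' d (Or.inr rfl))
      rw [hm]
      obtain ⟨x, xs, hx⟩ := exists_cons_merge h0 t
      rw [hx] at ih ⊢
      rw [fSpec_bs2, ← ih]
      simp [mapHead, unesc_bs, consHead]
  | case5 d r h1 h2 ih =>
    rcases hs : splitColon r with ⟨h0, t⟩
    rw [hs] at ih
    have hsp : splitColon (d :: r) = (d :: h0, t) := by simp [splitColon, hs, h1]
    rw [hsp]
    have hm : mergeLoop (d :: h0) [] t = mapHead ([d] ++ ·) (mergeLoop h0 [] t) :=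
      mergeLoop_prepend' [d] h0 t (trailingBS_single d h2)
    rw [hm]
    obtain ⟨x, xs, hx⟩ := exists_cons_merge h0 t
    rw [hx] at ih ⊢
    rw [fSpec_other d r h1 h2, ← ih]
    simp [mapHead, unesc_other d h2, consHead]

theorem mapHead_nil (X : List (List Char)) : mapHead (([] : List Char) ++ ·) X = X := by
  cases X <;> simp [mapHead]

theorem exists_cons_fSpec (r : List Char) : ∃ x xs, fSpec r = x :: xs := by
  cases hF : fSpec r with
  | nil => exact absurd hF (fSpec_ne_nil _)
  | cons x xs => exact ⟨x, xs, rfl⟩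

theorem parseALoop_eq (cs cur : List Char) (fields : List String) :
    parseALoop cs cur fields =
      fields ++ (mapHead (cur ++ ·) (fSpec cs)).map String.ofList := by
  induction cs, cur, fields using parseALoop.induct with
  | case1 cur fields => simp [parseALoop, fSpec, mapHead]
  | case2 c rest cur fields h ih =>
    obtain ⟨rfl, hne⟩ := h
    obtain ⟨d, rest', rfl⟩ := List.exists_cons_of_ne_nil hne
    simp only [List.tail_cons, List.head_cons] at ih
    obtain ⟨x, xs, hx⟩ := exists_cons_fSpec rest'
    rw [fSpec_bs2]
    simp [parseALoop, ih, hx, consHead, mapHead]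
  | case3 rest cur fields h ih =>
    rw [show parseALoop (':' :: rest) cur fields
          = parseALoop rest [] (fields ++ [String.ofList cur]) from by
        simp [parseALoop]]
    rw [ih, mapHead_nil]
    obtain ⟨x, xs, hx⟩ := exists_cons_fSpec rest
    rw [fSpec_colon]
    simp [hx, mapHead]
  | case4 c rest cur fields h hc ih =>
    by_cases hb : c = '\\'
    · subst hb
      have hrest : rest = [] := by
        by_contra hne
        exact h ⟨rfl, hne⟩
      subst hrest
      rw [fSpec_bs1]
      simp [parseALoop, mapHead]
    · obtain ⟨x, xs, hx⟩ := exists_cons_fSpec rest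
      rw [show parseALoop (c :: rest) cur fields
            = parseALoop rest (cur ++ [c]) fields from by
          simp [parseALoop, hc, hb]]
      rw [ih, fSpec_other c rest hc hb]
      simp [hx, consHead, mapHead]

-- ===== VERDICT (by name: the statement is the Claim_ definition above) =====
theorem parse_t_line_py_spec : Claim_equal_parse_t_line_py := by
  intro line _
  unfold Spec_parse_t_line_py parse_t_line_py parse_t_line_py_alt
  rw [parseALoop_eq, mapHead_nil]
  rw [← mergeStage_eq_fSpec line.toList]
  rcases hsp : splitColon line.toList with ⟨h, t⟩
  simp [Function.comp]
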